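-- pv_equiv track=rewrite | github.com/PhilGrunewald/dot_files | python/pyFilter.py | restoreFunctions
-- ===== SOURCE A (Python) =====
-- def uncomment(lines,n):
--     lines[n] = lines[n].replace("#_#","")
--     return lines
--
-- def restoreFunctions(lines):
--     isFunction = False
--     for n,line in enumerate(lines):
--         if line.startswith('#_#def '):
--             isFunction = True
--         elif not line.startswith('#_#    '):
--             isFunction = False
--         if isFunction:
--             uncomment(lines,n)
--     return lines
-- ===== SOURCE B (Python) =====
-- def restoreFunctions(lines):
--     # A line gets uncommented iff it starts the block ('#_#def ') or it is an
--     # indented commented line ('#_#    ') whose nearest preceding non-indented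
--     # line is a '#_#def ' line.  No forward state is carried: each line is
--     # decided independently by a backward lookup.
--     def active(i):
--         if lines[i].startswith('#_#def '):
--             return True
--         if not lines[i].startswith('#_#    '):
--             return False
--         j = i - 1
--         while j >= 0 and lines[j].startswith('#_#    '):
--             j -= 1
--         return j >= 0 and lines[j].startswith('#_#def ')
--
--     lines[:] = [l.replace('#_#', '') if active(i) else l
--                 for i, l in enumerate(lines)]
--     return lines
-- ===== Notes on version B (the rewrite author's own statement) =====
-- stated objective: alternative
-- what changed: Replaces A's forward boolean state machine (isFunction flag carried across an in-place mutating loop) with a stateless per-line rule: each line is decided independently by a backward lookup for the nearest non-indented predecessor, and the result is built as one list comprehension.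
import Mathlib
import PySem

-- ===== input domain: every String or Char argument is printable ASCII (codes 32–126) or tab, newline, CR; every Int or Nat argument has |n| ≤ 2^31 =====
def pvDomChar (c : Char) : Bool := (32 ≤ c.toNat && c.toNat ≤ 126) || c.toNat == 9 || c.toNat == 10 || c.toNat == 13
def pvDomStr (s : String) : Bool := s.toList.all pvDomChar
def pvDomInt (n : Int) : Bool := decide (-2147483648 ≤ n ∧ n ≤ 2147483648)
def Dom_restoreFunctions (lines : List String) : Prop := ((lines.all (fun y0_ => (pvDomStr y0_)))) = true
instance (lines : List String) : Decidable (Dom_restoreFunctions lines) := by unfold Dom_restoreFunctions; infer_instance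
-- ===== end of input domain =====

-- B replaces A's forward boolean state machine (isFunction flag mutated across the loop) with a
-- stateless per-line rule: each line is decided independently by a backward lookup for the nearest
-- non-indented predecessor, and the output is one list comprehension (objective: alternative).
-- Both Pythons mutate `lines` in place and return it; the equivalence proved is about the return value.

-- ===== PORT A =====
-- Python: lines[n] = lines[n].replace("#_#",""); n comes from enumerate, hence in range,
-- so pyGetD/pySetD are exact here.
def uncomment (lines : List String) (n : Int) : List String :=
  PySem.List.pySetD lines n (PySem.Str.replace (PySem.List.pyGetD lines n "") "#_#" "")

-- the body of A's for loop, on state (lines, isFunction)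
def foldAFn (st : List String × Bool) (p : Int × String) : List String × Bool :=
  let isF : Bool :=
    if PySem.Str.startswith p.2 "#_#def " then true
    else if ¬ PySem.Str.startswith p.2 "#_#    " then false
    else st.2
  if isF then (uncomment st.1 p.1, isF) else (st.1, isF)

-- `line` from `enumerate(lines)` at index n is fetched before the (only) mutation at index n,
-- so folding over the enumeration of the ORIGINAL list is exact.
def restoreFunctions (lines : List String) : List String :=
  ((PySem.List.enumerate lines 0).foldl foldAFn (lines, false)).1

-- ===== PORT B =====
-- the backward while loop: `j = i-1; while j >= 0 and lines[j].startswith('#_#    '): j -= 1;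
-- return j >= 0 and lines[j].startswith('#_#def ')` — argument k encodes j+1 (k = 0 ↔ j = -1);
-- every index read is in range in Python, so getD is exact.
def bBack (lines : List String) : Nat → Bool
  | 0 => false
  | k + 1 =>
    let l := lines.getD k ""
    if PySem.Str.startswith l "#_#    " then bBack lines k
    else PySem.Str.startswith l "#_#def "

-- Python's `active(i)`
def bActive (lines : List String) (i : Nat) : Bool :=
  let l := lines.getD i ""
  if PySem.Str.startswith l "#_#def " then true
  else if ¬ PySem.Str.startswith l "#_#    " then false
  else bBack lines i

-- the list comprehension `[l.replace('#_#','') if active(i) else l for i, l in enumerate(lines)]`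
def bGo (lines : List String) : Nat → List String → List String
  | _, [] => []
  | i, l :: rest =>
    (if bActive lines i then PySem.Str.replace l "#_#" "" else l) :: bGo lines (i + 1) rest

def restoreFunctions_alt (lines : List String) : List String :=
  bGo lines 0 lines

-- ===== PRECONDITION & SPEC =====
def Spec_restoreFunctions (lines : List String) (out : List String) : Prop := out = restoreFunctions_alt lines
instance (lines : List String) (out : List String) : Decidable (Spec_restoreFunctions lines out) := by unfold Spec_restoreFunctions; infer_instance

-- ===== CLAIM (what is proved, stated in full; the proofs are below) =====
def Claim_equal_restoreFunctions : Prop := ∀ (lines : List String), Dom_restoreFunctions lines → Spec_restoreFunctions lines (restoreFunctions lines)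

-- ===== LEMMAS AND PROOFS =====

/-- A's flag update for one line. -/
def rfStep (l : String) (f : Bool) : Bool :=
  if PySem.Str.startswith l "#_#def " then true
  else if ¬ PySem.Str.startswith l "#_#    " then false
  else f

def rfRepl (l : String) : String := PySem.Str.replace l "#_#" ""

/-- The common functional specification: per-line output driven by the flag recurrence. -/
def mapSpec : List String → Bool → List String
  | [], _ => []
  | l :: rest, f =>
    let f' := rfStep l f
    (if f' then rfRepl l else l) :: mapSpec rest f'

theorem foldAFn_eq (ls : List String) (f : Bool) (n : Int) (l : String) :
    foldAFn (ls, f) (n, l) = (if rfStep l f then uncomment ls n else ls, rfStep l f) := by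
  show (if rfStep l f then (uncomment ls n, rfStep l f) else (ls, rfStep l f)) = _
  cases rfStep l f <;> simp

theorem foldA_eq (rest : List String) : ∀ (pre : List String) (f : Bool),
    ((PySem.List.enumerate rest (pre.length : Int)).foldl foldAFn (pre ++ rest, f)).1
      = pre ++ mapSpec rest f := by
  induction rest with
  | nil => intro pre f; simp [PySem.List.enumerate_nil, mapSpec]
  | cons l rest ih =>
    intro pre f
    rw [PySem.List.enumerate_cons, List.foldl_cons, foldAFn_eq]
    have hget : PySem.List.pyGetD (pre ++ l :: rest) (pre.length : Int) "" = l := by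
      rw [PySem.List.pyGetD_natCast]
      simp [List.getD]
    have hun : uncomment (pre ++ l :: rest) (pre.length : Int) = (pre ++ [rfRepl l]) ++ rest := by
      unfold uncomment
      rw [hget, PySem.List.pySetD_natCast, List.set_append_right _ _ (le_refl _)]
      simp [rfRepl]
    cases hf : rfStep l f with
    | true =>
      rw [if_pos rfl, hun]
      have hlen : ((pre.length : Int) + 1) = (((pre ++ [rfRepl l]).length : Nat) : Int) := by simp
      rw [hlen, ih]
      simp only [mapSpec, hf]
      simp
    | false =>
      rw [if_neg (by simp)]
      have heq : pre ++ l :: rest = (pre ++ [l]) ++ rest := by simp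
      have hlen : ((pre.length : Int) + 1) = (((pre ++ [l]).length : Nat) : Int) := by simp
      rw [heq, hlen, ih]
      simp only [mapSpec, hf]
      simp

theorem restoreFunctions_eq_mapSpec (lines : List String) :
    restoreFunctions lines = mapSpec lines false := by
  have h := foldA_eq lines [] false
  simpa [restoreFunctions] using h

/-- '#_#def ' and '#_#    ' are incompatible prefixes (same length, different char at 3). -/
theorem not_both (l : String) (h : PySem.Str.startswith l "#_#def " = true) :
    PySem.Str.startswith l "#_#    " = false := by
  by_contra hc
  have h2 : PySem.Str.startswith l "#_#    " = true := by
    cases hh : PySem.Str.startswith l "#_#    "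
    · exact absurd hh hc
    · rfl
  rw [PySem.Str.startswith_eq] at h h2
  have p1 := (PySem.Chars.startswith_iff _ _).mp h
  have p2 := (PySem.Chars.startswith_iff _ _).mp h2
  have e1 := List.prefix_iff_eq_take.mp p1
  have e2 := List.prefix_iff_eq_take.mp p2
  have hlen : ("#_#def ".toList).length = ("#_#    ".toList).length := by decide
  rw [hlen] at e1
  have : ("#_#def ".toList) = ("#_#    ".toList) := e1.trans e2.symm
  exact absurd this (by decide)

/-- One step: at index pre.length holding line l, A's flag update from the backward-scan value
    equals both B's `active` decision and the next backward-scan value. -/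
theorem step_both (pre rest : List String) (l : String) :
    rfStep l (bBack (pre ++ l :: rest) pre.length)
        = bActive (pre ++ l :: rest) pre.length ∧
      bBack (pre ++ l :: rest) (pre.length + 1)
        = rfStep l (bBack (pre ++ l :: rest) pre.length) := by
  have hget : (pre ++ l :: rest).getD pre.length "" = l := by
    simp [List.getD]
  have hback : bBack (pre ++ l :: rest) (pre.length + 1)
      = (if PySem.Str.startswith l "#_#    " then bBack (pre ++ l :: rest) pre.length
         else PySem.Str.startswith l "#_#def ") := by
    show (let l' := (pre ++ l :: rest).getD pre.length "";
          if PySem.Str.startswith l' "#_#    " then bBack (pre ++ l :: rest) pre.length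
          else PySem.Str.startswith l' "#_#def ") = _
    rw [hget]
  have hact : bActive (pre ++ l :: rest) pre.length
      = (if PySem.Str.startswith l "#_#def " then true
         else if ¬ PySem.Str.startswith l "#_#    " then false
         else bBack (pre ++ l :: rest) pre.length) := by
    unfold bActive
    rw [hget]
  cases hd : PySem.Str.startswith l "#_#def " with
  | true =>
    have hi := not_both l hd
    simp at hd hi
    exact ⟨by simp [hact, rfStep, hd], by simp [hback, rfStep, hd, hi]⟩
  | false =>
    cases hi : PySem.Str.startswith l "#_#    " with
    | true =>
      simp at hd hi
      exact ⟨by simp [hact, rfStep, hd, hi], by simp [hback, rfStep, hd, hi]⟩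
    | false =>
      simp at hd hi
      exact ⟨by simp [hact, rfStep, hd, hi], by simp [hback, rfStep, hd, hi]⟩

theorem bGo_eq_mapSpec (lines : List String) : ∀ (rest pre : List String),
    lines = pre ++ rest →
    bGo lines pre.length rest = mapSpec rest (bBack lines pre.length) := by
  intro rest
  induction rest with
  | nil => intro pre _; rfl
  | cons l rest ih =>
    intro pre hsplit
    subst hsplit
    obtain ⟨hact, hnext⟩ := step_both pre rest l
    have hpre : (pre ++ [l]).length = pre.length + 1 := by simp
    have ih' := ih (pre ++ [l]) (by simp)
    rw [hpre] at ih'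
    show (if bActive (pre ++ l :: rest) pre.length then PySem.Str.replace l "#_#" "" else l)
        :: bGo (pre ++ l :: rest) (pre.length + 1) rest = _
    rw [← hact, ih', hnext]
    simp only [mapSpec, rfRepl]

theorem alt_eq_mapSpec (lines : List String) :
    restoreFunctions_alt lines = mapSpec lines false := by
  have h := bGo_eq_mapSpec lines lines [] rfl
  simp only [List.length_nil] at h
  have hb : bBack lines 0 = false := rfl
  rw [hb] at h
  simpa [restoreFunctions_alt] using h

-- ===== VERDICT (by name: the statement is the Claim_ definition above) =====
theorem restoreFunctions_spec : Claim_equal_restoreFunctions := by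
  intro lines _
  unfold Spec_restoreFunctions
  rw [restoreFunctions_eq_mapSpec, alt_eq_mapSpec]
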